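-- pv_equiv track=rewrite | github.com/iotoAnalytics/Hackathon_iotoAnalytics | scrapers/us/us-states/OK/legislation/us_ok_legislation_utils.py | _divide_into_pages
-- ===== SOURCE A (Python) =====
-- def _divide_into_pages(text):
--     pages = []
--
--     first_line_of_page = 0
--     last_line_of_page = None
--
--     for idx, line in enumerate(text):
--         if 'Top_of_Page' in line:
--             # If first line has been set, this means that this is first line of another page
--             if first_line_of_page != 0:
--                 last_line_of_page = idx - 1
--                 page_text = text[first_line_of_page + 1: last_line_of_page] # Add 1 to FLOP to start at the title of page
--                 pages.append(page_text)
--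
--             first_line_of_page = idx + 1
--
--     # Add last page
--     last_line_of_page = len(text) - 1
--     page_text = text[first_line_of_page + 1: last_line_of_page]
--     pages.append(page_text)
--
--     return pages
-- ===== SOURCE B (Python) =====
-- def _divide_into_pages(text):
--     starts = [i + 1 for i, line in enumerate(text) if 'Top_of_Page' in line]
--     pages = [text[starts[j - 1] + 1 : starts[j] - 2] for j in range(1, len(starts))]
--     pages.append(text[(starts[-1] if starts else 0) + 1 : len(text) - 1])
--     return pages
-- ===== Notes on version B (the rewrite author's own statement) =====
-- stated objective: alternative
-- what changed: Replaces A's single stateful loop carrying a running first_line_of_page accumulator with one pass that collects marker start indices into a list, a separate pairwise pass over consecutive boundaries building the inner pages, and a final slice from the last (or zero) start.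
import Mathlib
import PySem

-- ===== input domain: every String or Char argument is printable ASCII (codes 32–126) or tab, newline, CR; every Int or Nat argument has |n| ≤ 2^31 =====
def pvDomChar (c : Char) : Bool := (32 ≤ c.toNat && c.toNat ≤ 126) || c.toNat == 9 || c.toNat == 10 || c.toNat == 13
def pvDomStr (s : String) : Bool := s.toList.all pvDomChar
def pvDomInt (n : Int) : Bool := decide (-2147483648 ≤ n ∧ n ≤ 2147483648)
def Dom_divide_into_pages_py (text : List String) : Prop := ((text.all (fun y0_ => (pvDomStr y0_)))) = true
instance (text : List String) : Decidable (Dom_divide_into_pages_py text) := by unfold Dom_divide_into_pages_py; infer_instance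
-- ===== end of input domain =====

-- B replaces A's stateful running first_line_of_page accumulator by one pass collecting
-- marker start indices and a separate pairwise pass over consecutive boundaries (objective: alternative decomposition, same cost).

-- ===== PORT A =====
-- loop body of A's 'for idx, line in enumerate(text)': state = (pages, first_line_of_page)
def pvStepA (text : List String) (s : List (List String) × Int) (p : Int × String) :
    List (List String) × Int :=
  if PySem.Str.isIn "Top_of_Page" p.2 then
    if s.2 ≠ 0 then
      (s.1 ++ [PySem.List.slice text (some (s.2 + 1)) (some (p.1 - 1))], p.1 + 1)
    else (s.1, p.1 + 1)
  else s

def divide_into_pages_py (text : List String) : List (List String) :=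
  let st := (PySem.List.enumerate text 0).foldl (pvStepA text) ([], 0)
  st.1 ++ [PySem.List.slice text (some (st.2 + 1)) (some ((text.length : Int) - 1))]

-- ===== PORT B =====
-- the pairwise comprehension 'text[starts[j-1]+1 : starts[j]-2] for j in range(1, len(starts))'
def pvPairPages (text : List String) : List Int → List (List String)
  | [] => []
  | [_] => []
  | a :: b :: rest =>
      PySem.List.slice text (some (a + 1)) (some (b - 2)) :: pvPairPages text (b :: rest)

def divide_into_pages_py_alt (text : List String) : List (List String) :=
  let starts := ((PySem.List.enumerate text 0).filter
      (fun p => PySem.Str.isIn "Top_of_Page" p.2)).map (fun p => p.1 + 1)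
  pvPairPages text starts ++
    [PySem.List.slice text (some (starts.getLast?.getD 0 + 1)) (some ((text.length : Int) - 1))]

-- ===== PRECONDITION & SPEC =====
def Spec_divide_into_pages_py (text : List String) (out : List (List String)) : Prop := out = divide_into_pages_py_alt text
instance (text : List String) (out : List (List String)) : Decidable (Spec_divide_into_pages_py text out) := by unfold Spec_divide_into_pages_py; infer_instance

-- ===== CLAIM (what is proved, stated in full; the proofs are below) =====
def Claim_equal_divide_into_pages_py : Prop := ∀ (text : List String), Dom_divide_into_pages_py text → Spec_divide_into_pages_py text (divide_into_pages_py text)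

-- ===== LEMMAS AND PROOFS =====

-- pages A's loop emits when entered with first_line_of_page = f and the remaining marker indices ms
def pvPagesOf (text : List String) (f : Int) : List Int → List (List String)
  | [] => []
  | m :: ms =>
      (if f ≠ 0 then [PySem.List.slice text (some (f + 1)) (some (m - 1))] else []) ++
        pvPagesOf text (m + 1) ms

-- A's first_line_of_page after consuming the markers ms, starting from f
def pvLastF (f : Int) : List Int → Int
  | [] => f
  | m :: ms => pvLastF (m + 1) ms

theorem pvFold_eq (text : List String) (es : List (Int × String)) :
    ∀ (pg : List (List String)) (f : Int),
      es.foldl (pvStepA text) (pg, f) =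
        (pg ++ pvPagesOf text f
            ((es.filter (fun p => PySem.Str.isIn "Top_of_Page" p.2)).map Prod.fst),
         pvLastF f ((es.filter (fun p => PySem.Str.isIn "Top_of_Page" p.2)).map Prod.fst)) := by
  induction es with
  | nil => intro pg f; simp [pvPagesOf, pvLastF]
  | cons e es ih =>
    intro pg f
    rw [List.foldl_cons]
    cases hin : PySem.Str.isIn "Top_of_Page" e.2 with
    | false =>
      have hstep : pvStepA text (pg, f) e = (pg, f) := by
        unfold pvStepA; rw [hin]; simp
      rw [hstep, ih]
      simp at hin
      simp [hin]
    | true =>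
      simp at hin
      by_cases hf : f = 0
      · have hstep : pvStepA text (pg, f) e = (pg, e.1 + 1) := by
          unfold pvStepA; simp [hin, hf]
        rw [hstep, ih]
        simp [hin, hf, pvPagesOf, pvLastF]
      · have hstep : pvStepA text (pg, f) e =
            (pg ++ [PySem.List.slice text (some (f + 1)) (some (e.1 - 1))], e.1 + 1) := by
          unfold pvStepA; simp [hin, hf]
        rw [hstep, ih]
        simp [hin, hf, pvPagesOf, pvLastF, List.append_assoc]

theorem pvLastF_eq (ms : List Int) : ∀ f : Int,
    pvLastF f ms = ((ms.map (fun m => m + 1)).getLast?).getD f := by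
  induction ms with
  | nil => intro f; simp [pvLastF]
  | cons m ms ih =>
    intro f
    cases ms with
    | nil => simp [pvLastF]
    | cons m' ms' => simpa [pvLastF] using ih (m + 1)

theorem pvPairing (text : List String) (ms : List Int) :
    ∀ f : Int, f ≠ 0 → (∀ m ∈ ms, 0 ≤ m) →
      pvPagesOf text f ms = pvPairPages text (f :: ms.map (fun m => m + 1)) := by
  induction ms with
  | nil => intro f hf _; simp [pvPagesOf, pvPairPages]
  | cons m ms ih =>
    intro f hf hnn
    have hm : (0 : Int) ≤ m := hnn m (by simp)
    have h2 : m + 1 - 2 = m - 1 := by ring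
    simp only [pvPagesOf, pvPairPages, List.map_cons, hf, if_pos, ne_eq, not_false_iff, h2]
    rw [ih (m + 1) (by omega) (fun x hx => hnn x (by simp [hx]))]
    simp

theorem pvMarkers_nonneg (text : List String) (m : Int)
    (hm : m ∈ ((PySem.List.enumerate text 0).filter
      (fun p => PySem.Str.isIn "Top_of_Page" p.2)).map Prod.fst) : 0 ≤ m := by
  rcases List.mem_map.1 hm with ⟨p, hp, rfl⟩
  have hp' := List.mem_of_mem_filter hp
  rcases (PySem.List.mem_enumerate_iff text 0 p).1 hp' with ⟨k, hk, rfl⟩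
  simp

-- ===== VERDICT (by name: the statement is the Claim_ definition above) =====
theorem divide_into_pages_py_spec : Claim_equal_divide_into_pages_py := by
  intro text _
  unfold Spec_divide_into_pages_py divide_into_pages_py divide_into_pages_py_alt
  have key : ∀ (ms : List Int), (∀ x ∈ ms, (0 : Int) ≤ x) →
      pvPagesOf text 0 ms = pvPairPages text (ms.map (fun m => m + 1)) := by
    intro ms hnn
    cases ms with
    | nil => simp [pvPagesOf, pvPairPages]
    | cons m ms' =>
      have hm : (0 : Int) ≤ m := hnn m (by simp)
      simp only [pvPagesOf, List.map_cons]
      rw [if_neg (show ¬((0 : Int) ≠ 0) by simp), List.nil_append,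
        pvPairing text ms' (m + 1) (by omega) (fun x hx => hnn x (by simp [hx]))]
  have hmap : ((PySem.List.enumerate text 0).filter
      (fun p => PySem.Str.isIn "Top_of_Page" p.2)).map (fun p => p.1 + 1) =
      (((PySem.List.enumerate text 0).filter
        (fun p => PySem.Str.isIn "Top_of_Page" p.2)).map Prod.fst).map (fun m => m + 1) := by
    rw [List.map_map]; rfl
  rw [pvFold_eq text _ [] 0, hmap, pvLastF_eq, key _ (fun x hx => pvMarkers_nonneg text x hx)]
  simp
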